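-- pv_equiv track=rewrite | github.com/ziongh/miller | python/miller/tools/naming/parsers.py | strip_common_suffixes
-- ===== SOURCE A (Python) =====
-- def strip_common_suffixes(symbol_name: str) -> list[str]:
--     """
--     Strip common type suffixes from symbol names.
--
--     Common suffixes across languages:
--     - DTOs: Dto, DTO
--     - Models: Model, Entity
--     - Services: Service, Manager, Handler
--     - Repositories: Repository, Repo
--     - Controllers: Controller
--     - Factories: Factory
--     - Builders: Builder
--
--     Args:
--         symbol_name: Symbol name that may have suffix
--
--     Returns:
--         List of variants: [original, without_suffix, ...]
--
--     Examples:
--         >>> strip_common_suffixes("UserDto")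
--         ["UserDto", "User"]
--
--         >>> strip_common_suffixes("UserService")
--         ["UserService", "User"]
--
--         >>> strip_common_suffixes("UserRepository")
--         ["UserRepository", "User"]
--
--     Edge Cases:
--         - No suffix: "User" → ["User"]
--         - Ambiguous: "Service" → ["Service"] (whole word is suffix)
--         - Multiple: "UserServiceManager" → ["UserServiceManager", "UserService", "User"]
--     """
--     results = [symbol_name]
--
--     common_suffixes = [
--         "Controller", "Service", "Manager", "Handler", "Repository", "Repo",
--         "Factory", "Builder", "Model", "Entity", "Dto", "DTO"
--     ]
--
--     for suffix in common_suffixes: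
--         if symbol_name.endswith(suffix) and len(symbol_name) > len(suffix):
--             # Don't strip if the whole word IS the suffix
--             without_suffix = symbol_name[:-len(suffix)]
--             if without_suffix:  # Not empty after stripping
--                 results.append(without_suffix)
--
--                 # Recursively check for more suffixes
--                 more_variants = strip_common_suffixes(without_suffix)
--                 for variant in more_variants:
--                     if variant not in results:
--                         results.append(variant)
--                 break  # Only strip one suffix per call (recursion handles multiple)
--
--     return results
-- ===== SOURCE B (Python) =====
-- def strip_common_suffixes(symbol_name: str) -> list[str]:
--     """Iterative version: repeatedly strip the first matching suffix."""
--     suffixes = (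
--         "Controller", "Service", "Manager", "Handler", "Repository", "Repo",
--         "Factory", "Builder", "Model", "Entity", "Dto", "DTO"
--     )
--     results = [symbol_name]
--     current = symbol_name
--     while True:
--         match = next((suf for suf in suffixes
--                       if current.endswith(suf) and len(current) > len(suf)), None)
--         if match is None:
--             return results
--         current = current[:-len(match)]
--         results.append(current)
-- ===== Notes on version B (the rewrite author's own statement) =====
-- stated objective: simpler
-- what changed: Replaces A's recursion with a membership-checked dedup merge of recursive variants by a single iterative loop that repeatedly strips the first matching suffix and appends each stripped name; the dedup disappears because lengths strictly decrease.
import Mathlib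
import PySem

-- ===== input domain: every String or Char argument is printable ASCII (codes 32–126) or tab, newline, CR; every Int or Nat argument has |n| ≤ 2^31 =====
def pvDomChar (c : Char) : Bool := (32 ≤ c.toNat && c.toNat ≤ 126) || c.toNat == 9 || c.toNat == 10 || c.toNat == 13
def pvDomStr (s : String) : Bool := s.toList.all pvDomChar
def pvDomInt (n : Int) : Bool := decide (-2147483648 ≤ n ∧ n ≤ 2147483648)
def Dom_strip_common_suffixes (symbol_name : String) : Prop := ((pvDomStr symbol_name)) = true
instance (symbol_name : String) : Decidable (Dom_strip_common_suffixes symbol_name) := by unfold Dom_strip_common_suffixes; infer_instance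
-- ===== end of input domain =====

-- B replaces A's recursion-plus-dedup with one iterative loop that repeatedly strips the first
-- matching suffix (the strictly decreasing lengths make the dedup check redundant): simpler, same cost.


-- ===== PORT A =====
-- the common_suffixes list (shared by both Pythons)
def pvSuffixes : List (List Char) :=
  ["Controller".toList, "Service".toList, "Manager".toList, "Handler".toList,
   "Repository".toList, "Repo".toList, "Factory".toList, "Builder".toList,
   "Model".toList, "Entity".toList, "Dto".toList, "DTO".toList]

-- A's `for suffix in common_suffixes` up to its `break`: first suffix passing the guard
def pvFindSuffixA (s : List Char) : List (List Char) → Option (List Char)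
  | [] => none
  | suf :: rest =>
    if PySem.Chars.endswith s suf && decide (s.length > suf.length) then some suf
    else pvFindSuffixA s rest

-- A's body on code points: results=[s]; on the first match append s[:-len(suffix)], recurse,
-- append each recursive variant not already in results
def pvStripA (s : List Char) : List (List Char) :=
  match pvFindSuffixA s pvSuffixes with
  | none => [s]
  | some suf =>
    let without := PySem.List.slice s none (some (-(suf.length : Int)))
    if hw : without.length ≠ 0 then
      (pvStripA without).foldl
        (fun res v => if v ∈ res then res else res ++ [v])
        ([s] ++ [without])
    else [s]
termination_by s.length
decreasing_by
  have hw' : (PySem.List.slice s none (some (-(suf.length : Int)))).length ≠ 0 := hw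
  show (PySem.List.slice s none (some (-(suf.length : Int)))).length < s.length
  rcases Nat.eq_zero_or_pos suf.length with h0 | h0
  · exfalso
    apply hw'
    rw [show (-(suf.length : Int)) = 0 by omega, PySem.List.slice_to s (by norm_num)]
    simp
  · rw [PySem.List.slice_to_neg_natCast s suf.length h0] at hw' ⊢
    simp only [List.length_take] at hw' ⊢
    omega

def strip_common_suffixes (symbol_name : String) : List String :=
  (pvStripA symbol_name.toList).map String.ofList

-- ===== PORT B =====
-- B's `while True` loop: results grows by the stripped current until no suffix matches
def pvStripB (current : List Char) (results : List (List Char)) : List (List Char) :=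
  match h : pvSuffixes.find?
      (fun suf => PySem.Chars.endswith current suf && decide (current.length > suf.length)) with
  | none => results
  | some suf =>
    let nxt := PySem.List.slice current none (some (-(suf.length : Int)))
    pvStripB nxt (results ++ [nxt])
termination_by current.length
decreasing_by
  have hmem := List.mem_of_find?_eq_some h
  have hp := List.find?_some h
  have hpos : 0 < suf.length := by
    revert hmem; have : ∀ x ∈ pvSuffixes, 0 < x.length := by decide
    exact this suf
  simp only [Bool.and_eq_true, decide_eq_true_eq] at hp
  show (PySem.List.slice current none (some (-(suf.length : Int)))).length < current.length
  rw [PySem.List.slice_to_neg_natCast current suf.length hpos]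
  simp only [List.length_take]
  omega

def strip_common_suffixes_alt (symbol_name : String) : List String :=
  (pvStripB symbol_name.toList [symbol_name.toList]).map String.ofList

-- ===== PRECONDITION & SPEC =====
def Spec_strip_common_suffixes (symbol_name : String) (out : List String) : Prop := out = strip_common_suffixes_alt symbol_name
instance (symbol_name : String) (out : List String) : Decidable (Spec_strip_common_suffixes symbol_name out) := by unfold Spec_strip_common_suffixes; infer_instance

-- ===== CLAIM (what is proved, stated in full; the proofs are below) =====
def Claim_equal_strip_common_suffixes : Prop := ∀ (symbol_name : String), Dom_strip_common_suffixes symbol_name → Spec_strip_common_suffixes symbol_name (strip_common_suffixes symbol_name)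

-- ===== LEMMAS AND PROOFS =====

-- one stripping step: the slice by the first matching suffix (proof-only)
def pvStep (c : List Char) : Option (List Char) :=
  match pvSuffixes.find?
      (fun suf => PySem.Chars.endswith c suf && decide (c.length > suf.length)) with
  | none => none
  | some suf => some (PySem.List.slice c none (some (-(suf.length : Int))))

theorem pvStep_lt {c w : List Char} (h : pvStep c = some w) :
    0 < w.length ∧ w.length < c.length := by
  unfold pvStep at h
  rcases hf : pvSuffixes.find?
      (fun suf => PySem.Chars.endswith c suf && decide (c.length > suf.length)) with _ | suf
  · rw [hf] at h; exact absurd h (by simp)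
  · rw [hf] at h
    have hmem := List.mem_of_find?_eq_some hf
    have hp := List.find?_some hf
    have hpos : 0 < suf.length := by
      revert hmem; have : ∀ x ∈ pvSuffixes, 0 < x.length := by decide
      exact this suf
    simp only [Bool.and_eq_true, decide_eq_true_eq] at hp
    simp only [Option.some.injEq] at h
    subst h
    rw [PySem.List.slice_to_neg_natCast c suf.length hpos]
    simp only [List.length_take]
    omega

-- the chain of successive strips
def pvChain (c : List Char) : List (List Char) :=
  match h : pvStep c with
  | none => []
  | some w => w :: pvChain w
termination_by c.length
decreasing_by exact (pvStep_lt h).2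

theorem pvChain_eq (c : List Char) :
    pvChain c = match pvStep c with | none => [] | some w => w :: pvChain w := by
  rw [pvChain]
  rcases hs : pvStep c with _ | w <;> simp

theorem pvChain_length_lt (c : List Char) : ∀ v ∈ pvChain c, v.length < c.length := by
  induction hn : c.length using Nat.strong_induction_on generalizing c with
  | _ n ih =>
    subst hn
    rw [pvChain_eq]
    rcases h : pvStep c with _ | w
    · simp
    · intro v hv
      rcases List.mem_cons.mp hv with rfl | hv
      · exact (pvStep_lt h).2
      · exact lt_trans (ih w.length (pvStep_lt h).2 w rfl v hv) (pvStep_lt h).2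

theorem pvChain_nodup (c : List Char) : (pvChain c).Nodup := by
  induction hn : c.length using Nat.strong_induction_on generalizing c with
  | _ n ih =>
    subst hn
    rw [pvChain_eq]
    rcases h : pvStep c with _ | w
    · simp
    · refine List.nodup_cons.mpr ⟨fun hmem => ?_, ih w.length (pvStep_lt h).2 w rfl⟩
      exact absurd rfl (Nat.ne_of_lt (pvChain_length_lt w w hmem))

-- A's first-match scan is List.find? over the suffix list
theorem pvFindSuffixA_eq_find? (s : List Char) (l : List (List Char)) :
    pvFindSuffixA s l
      = l.find? (fun suf => PySem.Chars.endswith s suf && decide (s.length > suf.length)) := by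
  induction l with
  | nil => rfl
  | cons suf rest ih =>
    simp only [pvFindSuffixA, List.find?]
    cases hcond : PySem.Chars.endswith s suf && decide (s.length > suf.length) <;> simp [ih]

-- the dedup-append fold is plain append when nothing repeats
theorem pvDedupFold_eq_append (xs : List (List Char)) :
    ∀ acc : List (List Char), xs.Nodup → (∀ v ∈ xs, v ∉ acc) →
    xs.foldl (fun res v => if v ∈ res then res else res ++ [v]) acc = acc ++ xs := by
  induction xs with
  | nil => simp
  | cons x xs ih =>
    intro acc hnd hfresh
    have hx : x ∉ acc := hfresh x (List.mem_cons_self)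
    simp only [List.foldl_cons, if_neg hx]
    rw [ih (acc ++ [x]) (List.nodup_cons.mp hnd).2]
    · simp
    · intro v hv
      simp only [List.mem_append, List.mem_singleton, not_or]
      exact ⟨hfresh v (List.mem_cons_of_mem _ hv),
        fun hvx => (List.nodup_cons.mp hnd).1 (hvx ▸ hv)⟩

theorem pvStripB_eq (c : List Char) :
    ∀ acc : List (List Char), pvStripB c acc = acc ++ pvChain c := by
  induction hn : c.length using Nat.strong_induction_on generalizing c with
  | _ n ih =>
    subst hn
    intro acc
    rw [pvStripB, pvChain_eq]
    rcases hf : pvSuffixes.find?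
        (fun suf => PySem.Chars.endswith c suf && decide (c.length > suf.length)) with _ | suf
    · simp [pvStep, hf]
    · have hstep : pvStep c = some (PySem.List.slice c none (some (-(suf.length : Int)))) := by
        simp [pvStep, hf]
      simp only [hstep]
      rw [ih _ (pvStep_lt hstep).2 _ rfl]
      simp

theorem pvStripA_eq (c : List Char) : pvStripA c = c :: pvChain c := by
  induction hn : c.length using Nat.strong_induction_on generalizing c with
  | _ n ih =>
    subst hn
    rw [pvStripA, pvChain_eq, pvFindSuffixA_eq_find?]
    rcases hf : pvSuffixes.find?
        (fun suf => PySem.Chars.endswith c suf && decide (c.length > suf.length)) with _ | suf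
    · simp [pvStep, hf]
    · have hstep : pvStep c = some (PySem.List.slice c none (some (-(suf.length : Int)))) := by
        simp [pvStep, hf]
      have hlt := pvStep_lt hstep
      set w := PySem.List.slice c none (some (-(suf.length : Int))) with hw
      simp only [hstep, ← hw]
      rw [dif_pos (by omega)]
      rw [ih w.length hlt.2 w rfl]
      have hfresh : ∀ v ∈ pvChain w, v ∉ [c] ++ [w] := by
        intro v hv
        have hvlt := pvChain_length_lt w v hv
        simp only [List.cons_append, List.nil_append, List.mem_cons, List.not_mem_nil, or_false, not_or]
        constructor
        · intro hvc; have := congrArg List.length hvc; omega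
        · intro hvw; have := congrArg List.length hvw; omega
      simp only [List.foldl_cons]
      rw [if_pos (by simp)]
      rw [pvDedupFold_eq_append _ _ (pvChain_nodup w) hfresh]
      simp

-- ===== VERDICT (by name: the statement is the Claim_ definition above) =====
theorem strip_common_suffixes_spec : Claim_equal_strip_common_suffixes := by
  intro s _
  unfold Spec_strip_common_suffixes strip_common_suffixes strip_common_suffixes_alt
  rw [pvStripA_eq, pvStripB_eq]
  simp
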